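-- pv_equiv track=rewrite | github.com/kinari-labwork/AltEx-BE | src/exon_type_annotator.py | classify_exon_type
-- ===== SOURCE A (Python) =====
-- def classify_exon_type(
--         target_exon: tuple[int:int],
--         all_transcripts: list[list[tuple[int,int]]],
--         ) -> str :
--     """
--     Purpose:
--         タプル (start, end)の形式で与えられたexonが、ある遺伝子の全てのトランスクリプトに含まれるexonの(start, end)のタプルのリストに対して、
--         どのようなsplicing eventに該当するかを判定する。
--     Parameters:
--         target_exon: タプル (start, end)
--         all_transcripts: ある遺伝子の全てのトランスクリプトの (start, end)のタプルのリスト (次の関数で遺伝子ごとにグループ化してこの関数にinputする)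
--     Returns:
--         exon_type: str
--     """
--     start, end = target_exon
--
--     exact_match = 0
--     start_match_only = False
--     end_match_only = False
--     overlap_without_startend_match = False
--
--
--     for tx in all_transcripts:
--         if target_exon in tx:
--            exact_match += 1
--            continue
--         for ex in tx:
--             if ex[0] == start and ex[1] != end: #ex[0]は比較対象のexonのstart,ex[1]は比較対象のexonのend
--                 start_match_only = True #start だけ他のエキソンと一致し、 end は一致しない
--             elif ex[1] == end and ex[0] != start:
--                 end_match_only = True #endだけ他のエキソンと一致し、startは一致しない場合
--             elif (ex[0] < end and ex[1] > start) and (ex[0] != start or ex[1] != end):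
--                 overlap_without_startend_match = True #start, endどちらも他のエキソンと一致しないが、他のエキソンと1塩基以上の重複が生じている
--
--     total = len(all_transcripts)
--
--     if exact_match == total:
--         return "constitutive" #そもそもsplicing variantがない場合は全てconstitutiveとなる
--     elif exact_match > 1 and exact_match != total and not start_match_only and not end_match_only and not overlap_without_startend_match:
--         return "skipped" #2つ以上のトランスクリプトに存在するが、全ての転写物には存在しないエキソン
--     elif start_match_only and not end_match_only:
--         return "a5ss"
--     elif end_match_only and not start_match_only:
--         return "a3ss"
--     elif start_match_only and end_match_only:
--         return "intron_retention"
--     elif overlap_without_startend_match: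
--         return "overlap"
--     elif exact_match == 1 and exact_match != total:
--         return "unique" #他のトランスクリプトには全く見られないエキソン
--     else:
--         return "other"
-- ===== SOURCE B (Python) =====
-- def classify_exon_type(
--         target_exon: tuple[int:int],
--         all_transcripts: list[list[tuple[int,int]]],
--         ) -> str:
--     start, end = target_exon
--
--     exact_match = sum(1 for tx in all_transcripts if target_exon in tx)
--     others = [ex for tx in all_transcripts if target_exon not in tx for ex in tx]
--
--     start_match_only = any(ex[0] == start and ex[1] != end for ex in others)
--     end_match_only = any(ex[1] == end and ex[0] != start for ex in others)
--     overlap_without_startend_match = any(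
--         ex[0] < end and ex[1] > start and (ex[0] != start or ex[1] != end)
--         for ex in others)
--
--     total = len(all_transcripts)
--
--     if exact_match == total:
--         return "constitutive"
--     elif exact_match > 1 and exact_match != total and not start_match_only and not end_match_only and not overlap_without_startend_match:
--         return "skipped"
--     elif start_match_only and not end_match_only:
--         return "a5ss"
--     elif end_match_only and not start_match_only:
--         return "a3ss"
--     elif start_match_only and end_match_only:
--         return "intron_retention"
--     elif overlap_without_startend_match:
--         return "overlap"
--     elif exact_match == 1 and exact_match != total:
--         return "unique"
--     else:
--         return "other"
-- ===== Notes on version B (the rewrite author's own statement) =====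
-- stated objective: simpler
-- what changed: Replaces the single stateful nested loop with an elif-guarded flag machine by one counting pass for exact matches, one flat collection of exons from non-matching transcripts, and three independent any() passes (one per predicate, without the elif guards); the verdict chain is unchanged. The independent overlap pass may set its flag where A's elif suppresses it, but the verdict chain consults overlap only when both start/end flags are false, where the two agree.
import Mathlib
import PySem

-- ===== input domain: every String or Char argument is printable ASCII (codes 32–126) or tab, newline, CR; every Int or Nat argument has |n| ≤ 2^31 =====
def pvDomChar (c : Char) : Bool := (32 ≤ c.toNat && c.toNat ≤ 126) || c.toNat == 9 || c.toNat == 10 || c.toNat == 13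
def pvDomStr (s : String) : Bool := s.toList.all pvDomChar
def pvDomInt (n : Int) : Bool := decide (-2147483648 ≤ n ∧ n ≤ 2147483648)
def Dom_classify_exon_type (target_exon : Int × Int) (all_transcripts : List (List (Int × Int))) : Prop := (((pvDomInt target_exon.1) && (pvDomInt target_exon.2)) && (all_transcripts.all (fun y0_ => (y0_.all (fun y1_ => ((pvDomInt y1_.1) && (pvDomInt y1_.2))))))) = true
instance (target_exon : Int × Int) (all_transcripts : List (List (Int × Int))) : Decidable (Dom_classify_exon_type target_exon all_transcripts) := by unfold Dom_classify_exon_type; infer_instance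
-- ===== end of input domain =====

-- ===== PORT A =====
-- B replaces A's single stateful elif-guarded nested loop by a count plus three independent any-passes; return values are equal (objective: simpler).
-- inner-loop step of A's scan (elif chain over one comparison exon), state = (exact_match, start_match_only, end_match_only, overlap_without_startend_match)
def stepInA (s e : Int) (a : Int × Bool × Bool × Bool) (ex : Int × Int) : Int × Bool × Bool × Bool :=
  if ex.1 == s && ex.2 != e then (a.1, true, a.2.2.1, a.2.2.2)
  else if ex.2 == e && ex.1 != s then (a.1, a.2.1, true, a.2.2.2)
  else if (decide (ex.1 < e) && decide (ex.2 > s)) && (ex.1 != s || ex.2 != e) then (a.1, a.2.1, a.2.2.1, true)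
  else a

-- outer-loop step of A's scan over one transcript
def stepOutA (te : Int × Int) (a : Int × Bool × Bool × Bool) (tx : List (Int × Int)) : Int × Bool × Bool × Bool :=
  if tx.contains te then (a.1 + 1, a.2.1, a.2.2.1, a.2.2.2)
  else tx.foldl (stepInA te.1 te.2) a

def classify_exon_type (target_exon : Int × Int) (all_transcripts : List (List (Int × Int))) : String :=
  let st := all_transcripts.foldl (stepOutA target_exon) (0, false, false, false)
  let exact_match := st.1
  let start_match_only := st.2.1
  let end_match_only := st.2.2.1
  let overlap_without_startend_match := st.2.2.2
  let total : Int := all_transcripts.length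
  if exact_match == total then "constitutive"
  else if exact_match > 1 && exact_match != total && !start_match_only && !end_match_only && !overlap_without_startend_match then "skipped"
  else if start_match_only && !end_match_only then "a5ss"
  else if end_match_only && !start_match_only then "a3ss"
  else if start_match_only && end_match_only then "intron_retention"
  else if overlap_without_startend_match then "overlap"
  else if exact_match == 1 && exact_match != total then "unique"
  else "other"

-- ===== PORT B =====
def classify_exon_type_alt (target_exon : Int × Int) (all_transcripts : List (List (Int × Int))) : String :=
  let s := target_exon.1
  let e := target_exon.2
  let exact_match : Int := (all_transcripts.countP (fun tx => tx.contains target_exon) : Int)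
  let others := (all_transcripts.filter (fun tx => !(tx.contains target_exon))).flatMap (fun tx => tx)
  let start_match_only := others.any (fun ex => ex.1 == s && ex.2 != e)
  let end_match_only := others.any (fun ex => ex.2 == e && ex.1 != s)
  let overlap_without_startend_match := others.any (fun ex => (decide (ex.1 < e) && decide (ex.2 > s)) && (ex.1 != s || ex.2 != e))
  let total : Int := all_transcripts.length
  if exact_match == total then "constitutive"
  else if exact_match > 1 && exact_match != total && !start_match_only && !end_match_only && !overlap_without_startend_match then "skipped"
  else if start_match_only && !end_match_only then "a5ss"
  else if end_match_only && !start_match_only then "a3ss"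
  else if start_match_only && end_match_only then "intron_retention"
  else if overlap_without_startend_match then "overlap"
  else if exact_match == 1 && exact_match != total then "unique"
  else "other"

-- ===== PRECONDITION & SPEC =====
def Spec_classify_exon_type (target_exon : Int × Int) (all_transcripts : List (List (Int × Int))) (out : String) : Prop := out = classify_exon_type_alt target_exon all_transcripts
instance (target_exon : Int × Int) (all_transcripts : List (List (Int × Int))) (out : String) : Decidable (Spec_classify_exon_type target_exon all_transcripts out) := by unfold Spec_classify_exon_type; infer_instance

-- ===== CLAIM (what is proved, stated in full; the proofs are below) =====
def Claim_equal_classify_exon_type : Prop := ∀ (target_exon : Int × Int) (all_transcripts : List (List (Int × Int))), Dom_classify_exon_type target_exon all_transcripts → Spec_classify_exon_type target_exon all_transcripts (classify_exon_type target_exon all_transcripts)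

-- ===== LEMMAS AND PROOFS =====

-- the three predicates of the scan
def pStart (s e : Int) (ex : Int × Int) : Bool := ex.1 == s && ex.2 != e
def pEnd (s e : Int) (ex : Int × Int) : Bool := ex.2 == e && ex.1 != s
def pOv (s e : Int) (ex : Int × Int) : Bool := (decide (ex.1 < e) && decide (ex.2 > s)) && (ex.1 != s || ex.2 != e)
-- the overlap predicate as A's elif chain actually tests it
def pOvA (s e : Int) (ex : Int × Int) : Bool := !pStart s e ex && (!pEnd s e ex && pOv s e ex)

def anyNon (te : Int × Int) (ts : List (List (Int × Int))) (p : Int × Int → Bool) : Bool :=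
  ts.any (fun tx => !(tx.contains te) && tx.any p)

lemma any_congr_mem {α : Type} (l : List α) (f g : α → Bool) (h : ∀ x ∈ l, f x = g x) : l.any f = l.any g := by
  induction l with
  | nil => rfl
  | cons a t ih =>
    simp only [List.any_cons]
    rw [h a (by simp), ih (fun x hx => h x (by simp [hx]))]

lemma stepInA_eq (s e : Int) (a : Int × Bool × Bool × Bool) (ex : Int × Int) :
    stepInA s e a ex = (a.1, a.2.1 || pStart s e ex, a.2.2.1 || pEnd s e ex, a.2.2.2 || pOvA s e ex) := by
  obtain ⟨x, sm, em, ov⟩ := a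
  cases h1 : (ex.1 == s) <;> cases h2 : (ex.2 == e) <;>
    simp [stepInA, pStart, pEnd, pOvA, pOv, h1, h2, bne] <;> (split_ifs <;> simp_all)

lemma innerA_eq (s e : Int) (tx : List (Int × Int)) (a : Int × Bool × Bool × Bool) :
    tx.foldl (stepInA s e) a =
      (a.1, a.2.1 || tx.any (pStart s e), a.2.2.1 || tx.any (pEnd s e), a.2.2.2 || tx.any (pOvA s e)) := by
  induction tx generalizing a with
  | nil => simp
  | cons ex t ih =>
    rw [List.foldl_cons, stepInA_eq, ih]
    simp [Bool.or_assoc]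

lemma outerA_eq (te : Int × Int) (ts : List (List (Int × Int))) (a : Int × Bool × Bool × Bool) :
    ts.foldl (stepOutA te) a =
      (a.1 + (ts.countP (fun tx => tx.contains te) : Int),
       a.2.1 || anyNon te ts (pStart te.1 te.2),
       a.2.2.1 || anyNon te ts (pEnd te.1 te.2),
       a.2.2.2 || anyNon te ts (pOvA te.1 te.2)) := by
  induction ts generalizing a with
  | nil => simp [anyNon]
  | cons tx t ih =>
    rw [List.foldl_cons]
    by_cases hc : te ∈ tx
    · have h1 : stepOutA te a tx = (a.1 + 1, a.2.1, a.2.2.1, a.2.2.2) := by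
        simp [stepOutA, hc]
      rw [h1, ih]
      simp [anyNon, hc]
      ring
    · have h1 : stepOutA te a tx = tx.foldl (stepInA te.1 te.2) a := by
        simp [stepOutA, hc]
      rw [h1, innerA_eq, ih]
      simp [anyNon, hc, Bool.or_assoc]

lemma flatFilter_any (te : Int × Int) (ts : List (List (Int × Int))) (p : Int × Int → Bool) :
    ((ts.filter (fun tx => !(tx.contains te))).flatMap (fun tx => tx)).any p = anyNon te ts p := by
  induction ts with
  | nil => rfl
  | cons tx t ih =>
    simp only [anyNon, List.any_cons] at ih ⊢
    by_cases hc : te ∈ tx <;>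
      simp [hc, List.flatMap_cons, List.any_append]

lemma ov_eq_of_no_flags (te : Int × Int) (ts : List (List (Int × Int)))
    (h1 : anyNon te ts (pStart te.1 te.2) = false) (h2 : anyNon te ts (pEnd te.1 te.2) = false) :
    anyNon te ts (pOvA te.1 te.2) = anyNon te ts (pOv te.1 te.2) := by
  simp only [anyNon, List.any_eq_false] at h1 h2
  apply any_congr_mem
  intro tx htx
  by_cases hc : te ∈ tx
  · simp [hc]
  · have hs : tx.any (pStart te.1 te.2) = false := by simpa [hc] using h1 tx htx
    have he : tx.any (pEnd te.1 te.2) = false := by simpa [hc] using h2 tx htx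
    rw [List.any_eq_false] at hs he
    congr 1
    apply any_congr_mem
    intro ex hex
    have hps : pStart te.1 te.2 ex = false := by simpa using hs ex hex
    have hpe : pEnd te.1 te.2 ex = false := by simpa using he ex hex
    simp [pOvA, hps, hpe]

-- ===== VERDICT (by name: the statement is the Claim_ definition above) =====
theorem classify_exon_type_spec : Claim_equal_classify_exon_type := by
  intro te ts _
  show classify_exon_type te ts = classify_exon_type_alt te ts
  unfold classify_exon_type classify_exon_type_alt
  dsimp only
  rw [outerA_eq]
  dsimp only
  rw [flatFilter_any, flatFilter_any, flatFilter_any,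
    show (fun ex : Int × Int => ex.1 == te.1 && ex.2 != te.2) = pStart te.1 te.2 from rfl,
    show (fun ex : Int × Int => ex.2 == te.2 && ex.1 != te.1) = pEnd te.1 te.2 from rfl,
    show (fun ex : Int × Int => (decide (ex.1 < te.2) && decide (ex.2 > te.1)) && (ex.1 != te.1 || ex.2 != te.2)) = pOv te.1 te.2 from rfl,
    Int.zero_add]
  simp only [Bool.false_or]
  cases hsm : anyNon te ts (pStart te.1 te.2) <;> cases hem : anyNon te ts (pEnd te.1 te.2)
  · rw [ov_eq_of_no_flags te ts hsm hem]
  · simp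
  · simp
  · simp
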